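-- pv_equiv track=rewrite | github.com/revan3/Selene-V2 | baba_selene.py | decompor_grafema
-- ===== SOURCE A (Python) =====
-- DIGRAFOS = {"lh", "nh", "ch", "rr", "ss", "qu", "gu", "sc", "xc"}
--
-- def decompor_grafema(texto: str) -> list[str]:
--     """
--     Decompõe um grafema em unidades fonéticas:
--     - Dígrafos (lh, nh, ch, rr...) → 1 unidade
--     - Demais letras → 1 unidade por letra
--     Exemplos:
--       "ba"  → ["b", "a"]
--       "lha" → ["lh", "a"]
--       "bra" → ["b", "r", "a"]
--       "pato"→ ["p", "a", "t", "o"]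
--     """
--     letras = texto.lower()
--     unidades = []
--     i = 0
--     while i < len(letras):
--         # Tenta dígrafo de 2 caracteres
--         if i + 1 < len(letras) and letras[i:i+2] in DIGRAFOS:
--             unidades.append(letras[i:i+2])
--             i += 2
--         elif letras[i].isalpha():
--             unidades.append(letras[i])
--             i += 1
--         else:
--             i += 1  # ignora acentos/pontuação não-alfabéticos
--     return unidades
-- ===== SOURCE B (Python) =====
-- DIGRAFOS = {"lh", "nh", "ch", "rr", "ss", "qu", "gu", "sc", "xc"}
--
-- def decompor_grafema(texto: str) -> list[str]:
--     # Streaming two-phase tokenizer: fold over the characters carrying one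
--     # pending character, merging greedy digraphs; then filter out non-letters.
--     tokens = []
--     pend = ''
--     for c in texto.lower():
--         if pend:
--             if pend + c in DIGRAFOS:
--                 tokens.append(pend + c)
--                 pend = ''
--             else:
--                 tokens.append(pend)
--                 pend = c
--         else:
--             pend = c
--     if pend:
--         tokens.append(pend)
--     return [t for t in tokens if t in DIGRAFOS or t.isalpha()]
-- ===== Notes on version B (the rewrite author's own statement) =====
-- stated objective: faster
-- what changed: Replaced the index-based while loop (lookahead slicing with manual i += 1/2) by a two-phase pipeline: a single streaming fold over the characters carrying one pending character that greedily merges digraphs, followed by a comprehension filtering out non-alphabetic single tokens.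
import Mathlib
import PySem

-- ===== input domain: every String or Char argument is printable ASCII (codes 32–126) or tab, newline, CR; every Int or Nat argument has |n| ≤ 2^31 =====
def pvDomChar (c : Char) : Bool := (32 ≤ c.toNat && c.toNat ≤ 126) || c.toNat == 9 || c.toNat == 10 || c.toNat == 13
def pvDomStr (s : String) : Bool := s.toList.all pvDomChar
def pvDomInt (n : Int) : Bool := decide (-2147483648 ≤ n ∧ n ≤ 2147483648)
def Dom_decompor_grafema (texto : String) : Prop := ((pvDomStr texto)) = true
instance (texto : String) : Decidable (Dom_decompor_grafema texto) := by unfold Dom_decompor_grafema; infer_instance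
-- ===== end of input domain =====

-- B replaces A's index-based while loop by a streaming fold carrying one pending
-- character plus a separate filtering pass (objective: alternative decomposition).

def DIGRAFOS : List String := ["lh", "nh", "ch", "rr", "ss", "qu", "gu", "sc", "xc"]

-- ===== PORT A =====
-- A's while loop over index i is the obvious structural recursion on the suffix
-- letras[i:]; the guard 'i + 1 < len' is the two-element pattern below.
def goA : List Char → List String
  | [] => []
  | [a] => if PySem.Chars.isalpha a then [String.ofList [a]] else []
  | a :: b :: rest =>
    if DIGRAFOS.contains (String.ofList [a, b]) then String.ofList [a, b] :: goA rest
    else if PySem.Chars.isalpha a then String.ofList [a] :: goA (b :: rest)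
    else goA (b :: rest)

def decompor_grafema (texto : String) : List String :=
  goA (PySem.Str.lower texto).toList

-- ===== PORT B =====
def keepB (t : String) : Bool := DIGRAFOS.contains t || PySem.Str.strIsalpha t

-- Python's pend is '' or one character; ported as Option Char ('' ↔ none), exact.
def stepB (st : List String × Option Char) (c : Char) : List String × Option Char :=
  match st.2 with
  | some p =>
    if DIGRAFOS.contains (String.ofList [p, c]) then (st.1 ++ [String.ofList [p, c]], none)
    else (st.1 ++ [String.ofList [p]], some c)
  | none => (st.1, some c)

-- the trailing 'if pend: tokens.append(pend)' of Source B
def flushB (st : List String × Option Char) : List String :=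
  match st.2 with
  | some p => st.1 ++ [String.ofList [p]]
  | none => st.1

def decompor_grafema_alt (texto : String) : List String :=
  (flushB ((PySem.Str.lower texto).toList.foldl stepB ([], none))).filter keepB

-- ===== PRECONDITION & SPEC =====
def Spec_decompor_grafema (texto : String) (out : List String) : Prop := out = decompor_grafema_alt texto
instance (texto : String) (out : List String) : Decidable (Spec_decompor_grafema texto out) := by unfold Spec_decompor_grafema; infer_instance

-- ===== CLAIM (what is proved, stated in full; the proofs are below) =====
def Claim_equal_decompor_grafema : Prop := ∀ (texto : String), Dom_decompor_grafema texto → Spec_decompor_grafema texto (decompor_grafema texto)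

-- ===== LEMMAS AND PROOFS =====

/-- Tokens still to be emitted by B's phase 1 from state `pend` on input `cs`. -/
def phase1 : Option Char → List Char → List String
  | none, [] => []
  | some p, [] => [String.ofList [p]]
  | none, c :: cs => phase1 (some c) cs
  | some p, c :: cs =>
    if DIGRAFOS.contains (String.ofList [p, c]) then String.ofList [p, c] :: phase1 none cs
    else String.ofList [p] :: phase1 (some c) cs

theorem foldl_stepB (cs : List Char) : ∀ (acc : List String) (pend : Option Char),
    flushB (cs.foldl stepB (acc, pend)) = acc ++ phase1 pend cs := by
  induction cs with
  | nil => intro acc pend; cases pend <;> simp [phase1, flushB]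
  | cons c cs ih =>
    intro acc pend
    cases pend with
    | none => simpa [stepB, phase1] using ih acc (some c)
    | some p =>
      by_cases h : String.ofList [p, c] ∈ DIGRAFOS
      · simpa [stepB, phase1, h] using ih (acc ++ [String.ofList [p, c]]) none
      · simpa [stepB, phase1, h] using ih (acc ++ [String.ofList [p]]) (some c)

theorem keepB_single (p : Char) :
    keepB (String.ofList [p]) = PySem.Chars.isalpha p := by
  simp [keepB, DIGRAFOS, String.ext_iff, PySem.Str.strIsalpha, PySem.Chars.strIsalpha]

theorem filter_phase1 : ∀ (n : ℕ) (cs : List Char) (p : Char), cs.length ≤ n →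
    (phase1 (some p) cs).filter keepB = goA (p :: cs) := by
  intro n
  induction n with
  | zero =>
    intro cs p h
    match cs, h with
    | [], _ => simp [phase1, goA, List.filter_singleton, keepB_single]
  | succ n ih =>
    intro cs p h
    match cs with
    | [] => simp [phase1, goA, List.filter_singleton, keepB_single]
    | c :: cs =>
      simp only [List.length_cons, Nat.add_le_add_iff_right] at h
      by_cases hd : String.ofList [p, c] ∈ DIGRAFOS
      · have hrest : (phase1 none cs).filter keepB = goA cs := by
          match cs with
          | [] => simp [phase1, goA]
          | d :: cs' =>
            have : cs'.length ≤ n := by simp at h; omega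
            simpa [phase1] using ih cs' d this
        have hk : keepB (String.ofList [p, c]) = true := by
          simp [keepB, hd]
        simp [phase1, goA, hd, hk, hrest]
      · have htail := ih cs c h
        by_cases ha : PySem.Chars.isalpha p = true <;>
          simp [phase1, goA, hd, ha, keepB_single, htail]

theorem decompor_grafema_spec : Claim_equal_decompor_grafema := by
  intro texto _
  unfold Spec_decompor_grafema decompor_grafema decompor_grafema_alt
  rw [foldl_stepB]
  cases hcs : (PySem.Str.lower texto).toList with
  | nil => simp [phase1, goA]
  | cons c cs =>
    simpa [phase1] using (filter_phase1 cs.length cs c le_rfl).symm
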